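-- pv_equiv track=rewrite | github.com/blitt2018/SPoRC_data | applyHostGuestModel/aggregateAnnotations.py | getMostConfident
-- ===== SOURCE A (Python) =====
-- def getMostConfident(inList):
--
--     maxVal = 0
--     maxValIx = 2
--     for row in inList:
--         for colNum, item in enumerate(row):
--
--             #if we have a new highest value, update
--             #note that maxValIx is just our prediction of 0, 1, or 2
--             if item > maxVal:
--                 maxVal = item
--                 maxValIx = colNum
--     return maxValIx
-- ===== SOURCE B (Python) =====
-- def getMostConfident(inList):
--     best = max((item for row in inList for item in row), default=0)
--     if best <= 0:
--         return 2
--     for row in inList: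
--         for colNum, item in enumerate(row):
--             if item == best:
--                 return colNum
--     return 2  # unreachable: best > 0 implies best occurs in inList
-- ===== Notes on version B (the rewrite author's own statement) =====
-- stated objective: alternative
-- what changed: Replaces the single state-tracking loop (running maxVal/maxValIx) with two stateless passes: one max() over the flattened matrix, then an early-return scan for the first column index holding that maximum (default 2 when the maximum is not positive).
import Mathlib
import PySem

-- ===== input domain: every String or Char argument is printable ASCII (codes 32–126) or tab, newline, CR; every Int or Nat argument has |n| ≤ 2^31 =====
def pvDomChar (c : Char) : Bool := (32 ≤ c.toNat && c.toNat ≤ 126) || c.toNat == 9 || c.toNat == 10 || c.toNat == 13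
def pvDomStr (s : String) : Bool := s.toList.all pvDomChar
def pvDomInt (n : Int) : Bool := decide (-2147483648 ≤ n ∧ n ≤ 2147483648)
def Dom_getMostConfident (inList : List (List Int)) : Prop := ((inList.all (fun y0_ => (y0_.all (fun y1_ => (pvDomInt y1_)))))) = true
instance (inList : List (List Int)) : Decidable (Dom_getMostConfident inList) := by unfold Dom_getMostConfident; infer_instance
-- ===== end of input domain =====

-- B replaces A's single running-max/running-index loop with two stateless passes
-- (a global max, then a first-occurrence scan); objective: alternative decomposition.

-- ===== PORT A =====
-- literal port of A: nested loops threading the (maxVal, maxValIx) state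
def getMostConfident (inList : List (List Int)) : Int :=
  (inList.foldl
      (fun st row =>
        (PySem.List.enumerate row).foldl
          (fun st p => if p.2 > st.1 then (p.2, p.1) else st) st)
      ((0 : Int), (2 : Int))).2

-- ===== PORT B =====
-- inner loop of Source B: 'for colNum, item in enumerate(row): if item == best: return colNum'
def pvFindRow (best : Int) : List (Int × Int) → Option Int
  | [] => none
  | p :: ps => if p.2 = best then some p.1 else pvFindRow best ps

-- outer loop of Source B with its early return
def pvFindRows (best : Int) : List (List Int) → Option Int
  | [] => none
  | r :: rs =>
    match pvFindRow best (PySem.List.enumerate r) with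
    | some c => some c
    | none => pvFindRows best rs

def getMostConfident_alt (inList : List (List Int)) : Int :=
  -- best = max((item for row in inList for item in row), default=0)
  let best : Int :=
    match inList.flatten with
    | [] => 0
    | x :: xs => xs.foldl max x
  if best ≤ 0 then 2
  else
    match pvFindRows best inList with
    | some c => c
    | none => 2   -- unreachable fallthrough 'return 2' of Source B

-- ===== PRECONDITION & SPEC =====
def Spec_getMostConfident (inList : List (List Int)) (out : Int) : Prop := out = getMostConfident_alt inList
instance (inList : List (List Int)) (out : Int) : Decidable (Spec_getMostConfident inList out) := by unfold Spec_getMostConfident; infer_instance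

-- ===== CLAIM (what is proved, stated in full; the proofs are below) =====
def Claim_equal_getMostConfident : Prop := ∀ (inList : List (List Int)), Dom_getMostConfident inList → Spec_getMostConfident inList (getMostConfident inList)

-- ===== LEMMAS AND PROOFS =====

-- A's nested loop as a single recursion over the row-major (colNum, item) pairs
def pvRun : List (Int × Int) → Int → Int → Int
  | [], _, i => i
  | p :: ps, v, i => if p.2 > v then pvRun ps p.2 p.1 else pvRun ps v i

-- running max of the items, seeded with v
def pvV (P : List (Int × Int)) (v : Int) : Int :=
  P.foldl (fun a p => max a p.2) v

lemma pvV_cons (p : Int × Int) (ps : List (Int × Int)) (v : Int) :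
    pvV (p :: ps) v = pvV ps (max v p.2) := rfl

lemma le_pvV (P : List (Int × Int)) (v : Int) : v ≤ pvV P v := by
  induction P generalizing v with
  | nil => exact le_refl v
  | cons p ps ih =>
    exact le_trans (le_max_left v p.2) (ih (max v p.2))

lemma pvFindRow_isSome (P : List (Int × Int)) (v : Int) (h : v < pvV P v) :
    (pvFindRow (pvV P v) P).isSome = true := by
  induction P generalizing v with
  | nil => exact absurd h (lt_irrefl v)
  | cons p ps ih =>
    rw [pvV_cons] at h ⊢
    by_cases hp : p.2 = pvV ps (max v p.2)
    · simp only [pvFindRow, if_pos hp, Option.isSome_some]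
    · have hlt : max v p.2 < pvV ps (max v p.2) := by
        rcases lt_or_eq_of_le (le_pvV ps (max v p.2)) with h1 | h1
        · exact h1
        · exfalso
          rcases max_choice v p.2 with hm | hm
          · rw [hm] at h1 h; omega
          · rw [hm] at h1 hp; exact hp h1
      simp only [pvFindRow, if_neg hp]
      exact ih (max v p.2) hlt

-- characterisation of A's loop: result index is the first occurrence of the max
lemma pvRun_eq (P : List (Int × Int)) (v i : Int) :
    pvRun P v i =
      if pvV P v ≤ v then i else (pvFindRow (pvV P v) P).getD i := by
  induction P generalizing v i with
  | nil => simp [pvRun, pvV]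
  | cons p ps ih =>
    rw [pvV_cons]
    by_cases hgt : p.2 > v
    · have hmax : max v p.2 = p.2 := max_eq_right (le_of_lt hgt)
      rw [hmax]
      have hVv : ¬ pvV ps p.2 ≤ v := by
        have := le_pvV ps p.2; omega
      rw [if_neg hVv]
      simp only [pvRun, if_pos hgt]
      rw [ih p.2 p.1]
      by_cases hle : pvV ps p.2 ≤ p.2
      · have heq : pvV ps p.2 = p.2 := le_antisymm hle (le_pvV ps p.2)
        simp [pvFindRow, heq]
      · have hne : ¬ p.2 = pvV ps p.2 := by
          have := le_pvV ps p.2; intro hc; omega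
        simp only [pvFindRow, if_neg hne, if_neg hle]
        have hs := pvFindRow_isSome ps p.2 (by have := le_pvV ps p.2; omega)
        rcases Option.isSome_iff_exists.mp hs with ⟨c, hc⟩
        rw [hc]; rfl
    · have hmax : max v p.2 = v := max_eq_left (by omega)
      rw [hmax]
      simp only [pvRun, if_neg hgt]
      rw [ih v i]
      by_cases hle : pvV ps v ≤ v
      · simp [hle]
      · have hne : ¬ p.2 = pvV ps v := by
          have := le_pvV ps v; intro hc; omega
        simp [pvFindRow, hne, hle]

-- A's foldl-of-foldl equals pvRun on the flattened enumerated pairs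
lemma foldl_step_eq_pvRun (P : List (Int × Int)) (s : Int × Int) :
    P.foldl (fun st p => if p.2 > st.1 then (p.2, p.1) else st) s = (pvV P s.1, pvRun P s.1 s.2) := by
  induction P generalizing s with
  | nil => simp [pvV, pvRun]
  | cons p ps ih =>
    simp only [List.foldl_cons, pvV_cons, pvRun]
    by_cases hgt : p.2 > s.1
    · rw [if_pos hgt, ih, max_eq_right (le_of_lt hgt), if_pos hgt]
    · rw [if_neg hgt, ih, max_eq_left (by omega), if_neg hgt]

lemma foldl_flatMap' {α β γ : Type} (f : α → List β) (g : γ → β → γ) (l : List α) (s : γ) :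
    (l.flatMap f).foldl g s = l.foldl (fun s x => (f x).foldl g s) s := by
  induction l generalizing s with
  | nil => rfl
  | cons a as ih => rw [List.flatMap_cons, List.foldl_append, ih, List.foldl_cons]

lemma getMostConfident_eq_pvRun (inList : List (List Int)) :
    getMostConfident inList =
      pvRun (inList.flatMap (fun r => PySem.List.enumerate r)) 0 2 := by
  unfold getMostConfident
  rw [← foldl_flatMap', foldl_step_eq_pvRun]

-- pvFindRow distributes over append as first-match
lemma pvFindRow_append (best : Int) (xs ys : List (Int × Int)) :
    pvFindRow best (xs ++ ys) =
      match pvFindRow best xs with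
      | some c => some c
      | none => pvFindRow best ys := by
  induction xs with
  | nil => rfl
  | cons p ps ih =>
    by_cases hp : p.2 = best
    · simp [pvFindRow, hp]
    · simp [pvFindRow, hp, ih]

lemma pvFindRows_eq (best : Int) (l : List (List Int)) :
    pvFindRows best l = pvFindRow best (l.flatMap (fun r => PySem.List.enumerate r)) := by
  induction l with
  | nil => rfl
  | cons r rs ih =>
    rw [List.flatMap_cons, pvFindRow_append]
    simp only [pvFindRows, ih]

lemma map_snd_flatMap_enumerate (l : List (List Int)) :
    (l.flatMap (fun r => PySem.List.enumerate r)).map (·.2) = l.flatten := by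
  induction l with
  | nil => rfl
  | cons r rs ih =>
    rw [List.flatMap_cons, List.map_append, ih, PySem.List.map_snd_enumerate, List.flatten_cons]

lemma pvV_eq_foldl_max (P : List (Int × Int)) (v : Int) :
    pvV P v = (P.map (·.2)).foldl max v := by
  induction P generalizing v with
  | nil => rfl
  | cons p ps ih => rw [pvV_cons, List.map_cons, List.foldl_cons, ih]

lemma foldl_max_cons (a x : Int) (l : List Int) :
    List.foldl max (max a x) l = max a (List.foldl max x l) := by
  induction l generalizing x with
  | nil => rfl
  | cons y ys ih => rw [List.foldl_cons, List.foldl_cons, max_assoc, ih]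

-- ===== VERDICT (by name: the statement is the Claim_ definition above) =====
theorem getMostConfident_spec : Claim_equal_getMostConfident := by
  intro inList _
  unfold Spec_getMostConfident
  rw [getMostConfident_eq_pvRun, pvRun_eq]
  unfold getMostConfident_alt
  set P := inList.flatMap (fun r => PySem.List.enumerate r) with hP
  have hflat : inList.flatten = P.map (·.2) := (map_snd_flatMap_enumerate inList).symm
  rw [hflat, pvV_eq_foldl_max]
  cases hF : P.map (·.2) with
  | nil => simp
  | cons x xs =>
    simp only [List.foldl_cons]
    set best := List.foldl max x xs with hbest
    have hmax : List.foldl max (max 0 x) xs = max 0 best := by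
      rw [hbest, foldl_max_cons]
    rw [hmax]
    by_cases hb : best ≤ 0
    · rw [if_pos (by omega : max 0 best ≤ (0:Int)), if_pos hb]
    · rw [if_neg (by omega : ¬ max 0 best ≤ (0:Int)), if_neg hb]
      have hbm : max 0 best = best := max_eq_right (by omega)
      rw [hbm, pvFindRows_eq]
      have hs : (pvFindRow best P).isSome = true := by
        have hv : pvV P 0 = best := by
          rw [pvV_eq_foldl_max, hF, List.foldl_cons, hmax, hbm]
        rw [← hv]
        exact pvFindRow_isSome P 0 (by rw [hv]; omega)
      rcases Option.isSome_iff_exists.mp hs with ⟨c, hc⟩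
      rw [hc]; rfl
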